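-- pv_equiv track=rewrite | github.com/wuotans/botqualidade56124 | priority_classes/priority_classes/webmail/webmail.py | d_salt
-- ===== SOURCE A (Python) =====
-- import string
--
-- def d_salt(salted):
--     """
--     Removes the salt from the input data.
--
--     :param salted: Salted data.
--     :type salted: str
--     :return: Original unsalted data.
--     :rtype: str
--     """
--     original_dados = ""
--     salt = string.ascii_uppercase + string.ascii_lowercase
--     for i, c in enumerate(salted[::-1]):
--         index = salt.find(c)
--         index_char_alt_range = salt[-7:].find(c)
--         d_salted = (
--             salt[index + 7]
--             if index_char_alt_range == -1
--             else salt[index_char_alt_range]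
--         )
--         if i % 2 != 0:
--             original_dados += c if index == -1 else d_salted
--     return original_dados
-- ===== SOURCE B (Python) =====
-- import string
--
--
-- def d_salt(salted):
--     """
--     Removes the salt from the input data.
--
--     :param salted: Salted data.
--     :type salted: str
--     :return: Original unsalted data.
--     :rtype: str
--     """
--     salt = string.ascii_uppercase + string.ascii_lowercase
--     table = str.maketrans(salt, salt[7:] + salt[:7])
--     return salted[::-1][1::2].translate(table)
-- ===== Notes on version B (the rewrite author's own statement) =====
-- stated objective: idiomatic
-- what changed: Replaces A's enumerate loop over the reversed string with its per-character salt.find lookups and tuvwxyz wraparound branch by one prebuilt rotate-by-7 translation table (str.maketrans) applied to the slice salted[::-1][1::2].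
import Mathlib
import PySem

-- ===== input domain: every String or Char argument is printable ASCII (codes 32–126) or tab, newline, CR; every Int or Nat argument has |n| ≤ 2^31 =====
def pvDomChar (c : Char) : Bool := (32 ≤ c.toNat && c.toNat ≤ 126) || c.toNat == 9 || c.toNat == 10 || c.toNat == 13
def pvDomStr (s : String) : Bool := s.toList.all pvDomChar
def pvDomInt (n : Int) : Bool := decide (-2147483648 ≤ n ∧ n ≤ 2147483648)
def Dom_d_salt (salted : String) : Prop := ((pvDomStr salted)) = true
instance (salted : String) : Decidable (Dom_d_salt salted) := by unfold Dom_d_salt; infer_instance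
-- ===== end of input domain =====

-- B replaces A's per-character enumerate loop with salt.find lookups by one prebuilt
-- rotate-by-7 translation table applied to the slice salted[::-1][1::2] (objective: idiomatic).

-- salt = string.ascii_uppercase + string.ascii_lowercase (shared module constant)
def pvSalt : List Char :=
  "ABCDEFGHIJKLMNOPQRSTUVWXYZ".toList ++ "abcdefghijklmnopqrstuvwxyz".toList

-- ===== PORT A =====
def d_salt (salted : String) : String :=
  let salt := pvSalt
  let rev := (PySem.List.slice? salted.toList none none (-1)).getD []   -- salted[::-1]
  String.ofList <|
    (PySem.List.enumerate rev 0).foldl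
      (fun acc ic =>
        let i := ic.1
        let c := ic.2
        let index := PySem.Chars.find salt [c]
        let indexCharAltRange := PySem.Chars.find (PySem.List.slice salt (some (-7)) none) [c]
        -- salt[index + 7] / salt[indexCharAltRange]: pyGet? with .getD c; the none
        -- branch is unreachable (when used, the index is within 0..51)
        let dSalted :=
          if indexCharAltRange = -1 then (PySem.List.pyGet? salt (index + 7)).getD c
          else (PySem.List.pyGet? salt indexCharAltRange).getD c
        if PySem.Int.mod i 2 ≠ 0 then acc ++ [if index = -1 then c else dSalted]
        else acc)
      []

-- ===== PORT B =====
-- str.maketrans(salt, salt[7:] + salt[:7]): a char→char mapping built once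
def pvTable : PySem.Dict Char Char :=
  PySem.Dict.ofList (pvSalt.zip (pvSalt.drop 7 ++ pvSalt.take 7))

def d_salt_alt (salted : String) : String :=
  let rev := (PySem.List.slice? salted.toList none none (-1)).getD []   -- salted[::-1]
  let odd := (PySem.List.slice? rev (some 1) none 2).getD []            -- …[1::2]
  -- .translate(table): each mapped char replaced, unmapped chars kept
  String.ofList (odd.map (fun c => pvTable.getD c c))

-- ===== PRECONDITION & SPEC =====
def Spec_d_salt (salted : String) (out : String) : Prop := out = d_salt_alt salted
instance (salted : String) (out : String) : Decidable (Spec_d_salt salted out) := by unfold Spec_d_salt; infer_instance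

-- ===== CLAIM (what is proved, stated in full; the proofs are below) =====
def Claim_equal_d_salt : Prop := ∀ (salted : String), Dom_d_salt salted → Spec_d_salt salted (d_salt salted)

-- ===== LEMMAS AND PROOFS =====

-- the characters at odd positions (what the slice [1::2] selects)
def oddEls {α : Type} : List α → List α
  | [] => []
  | [_] => []
  | _ :: y :: t => y :: oddEls t

theorem mem_oddEls {α : Type} {x : α} : ∀ {l : List α}, x ∈ oddEls l → x ∈ l
  | [], h => by simp [oddEls] at h
  | [_], h => by simp [oddEls] at h
  | a :: y :: t, h => by
      simp only [oddEls, List.mem_cons] at h ⊢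
      rcases h with h | h
      · exact Or.inr (Or.inl h)
      · exact Or.inr (Or.inr (mem_oddEls h))

-- the filterMap core of slice? with start 1, step 2 selects the odd positions
theorem filterMap_odd {α : Type} : ∀ (xs : List α),
    List.filterMap (fun k : Nat => xs[((1 : Int) + 2 * (k : Int)).toNat]?)
      (List.range (xs.length / 2)) = oddEls xs
  | [] => by simp [oddEls]
  | [x] => by simp [oddEls]
  | x :: y :: t => by
      have hlen : (x :: y :: t).length / 2 = t.length / 2 + 1 := by
        simp only [List.length_cons]; omega
      have hf : ((fun k : Nat => (x :: y :: t)[((1 : Int) + 2 * (k : Int)).toNat]?) ∘ Nat.succ)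
          = fun k : Nat => t[((1 : Int) + 2 * (k : Int)).toNat]? := by
        funext k
        have h1 : ((1 : Int) + 2 * ((Nat.succ k : Nat) : Int)).toNat = 2 * k + 3 := by
          omega
        have h2 : ((1 : Int) + 2 * (k : Int)).toNat = 2 * k + 1 := by omega
        simp only [Function.comp_apply, h1, h2]
        rw [show 2 * k + 3 = (2 * k + 1) + 1 + 1 by omega]
        simp
      rw [hlen, List.range_succ_eq_map, List.filterMap_cons, List.filterMap_map, hf,
        filterMap_odd t]
      norm_num [oddEls]
  termination_by xs => xs.length
  decreasing_by simp

-- slice? xs 1 none 2 IS the odd-position sublist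
theorem slice?_one_two {α : Type} (xs : List α) :
    PySem.List.slice? xs (some 1) none 2 = some (oddEls xs) := by
  cases xs with
  | nil => rfl
  | cons x t =>
      rw [← filterMap_odd (x :: t)]
      simp only [PySem.List.slice?, PySem.List.sliceIndices]
      norm_num
      have hcount : (if 0 < t.length then (((t.length : Int) + 2 - 1) / 2).toNat else 0)
          = (t.length + 1) / 2 := by
        split <;> omega
      rw [hcount]

-- A's per-character transformation, named
def trA (c : Char) : Char :=
  let index := PySem.Chars.find pvSalt [c]
  let indexCharAltRange := PySem.Chars.find (PySem.List.slice pvSalt (some (-7)) none) [c]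
  let dSalted :=
    if indexCharAltRange = -1 then (PySem.List.pyGet? pvSalt (index + 7)).getD c
    else (PySem.List.pyGet? pvSalt indexCharAltRange).getD c
  if index = -1 then c else dSalted

-- A's loop over enumerate keeps exactly the odd positions, transformed by trA
theorem foldl_enumerate_odd : ∀ (l : List Char) (acc : List Char) (j : Int), j % 2 = 0 →
    (PySem.List.enumerate l j).foldl
      (fun acc ic =>
        if PySem.Int.mod ic.1 2 ≠ 0 then acc ++ [trA ic.2] else acc) acc
      = acc ++ (oddEls l).map trA
  | [], acc, j, _ => by simp [PySem.List.enumerate_nil, oddEls]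
  | [x], acc, j, hj => by
      simp only [PySem.List.enumerate_cons, PySem.List.enumerate_nil, List.foldl_cons,
        List.foldl_nil, oddEls, List.map_nil, List.append_nil]
      rw [PySem.Int.mod_eq_emod_of_pos (by omega : (0:Int) < 2)]
      simp [hj]
  | x :: y :: t, acc, j, hj => by
      simp only [PySem.List.enumerate_cons, List.foldl_cons]
      rw [PySem.Int.mod_eq_emod_of_pos (by omega : (0:Int) < 2),
        PySem.Int.mod_eq_emod_of_pos (by omega : (0:Int) < 2)]
      have h1 : ¬ (j % 2 ≠ 0) := by omega
      have h2 : ((j + 1) % 2 ≠ 0) := by omega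
      simp only [h1, if_false]
      rw [if_pos h2, foldl_enumerate_odd t (acc ++ [trA y]) (j + 1 + 1) (by omega)]
      simp [oddEls]
  termination_by l => l.length
  decreasing_by simp

-- the two per-character maps agree on every code point below 127
set_option maxRecDepth 100000 in
theorem trA_eq_trB_below (c : Char) (hc : c.toNat < 127) : trA c = pvTable.getD c c := by
  have h : ∀ n ∈ List.range 127, trA (Char.ofNat n) = pvTable.getD (Char.ofNat n) (Char.ofNat n) := by
    decide
  have := h c.toNat (List.mem_range.mpr hc)
  rwa [Char.ofNat_toNat] at this

-- ===== VERDICT (by name: the statement is the Claim_ definition above) =====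
theorem d_salt_spec : Claim_equal_d_salt := by
  intro s hdom
  show d_salt s = d_salt_alt s
  have hrev : (PySem.List.slice? s.toList none none (-1)).getD [] = s.toList.reverse := by
    rw [PySem.List.slice?_none_none_neg_one]; rfl
  have hA : d_salt s = String.ofList
      ((PySem.List.enumerate s.toList.reverse 0).foldl
        (fun acc ic =>
          if PySem.Int.mod ic.1 2 ≠ 0 then acc ++ [trA ic.2] else acc) []) := by
    unfold d_salt
    rw [hrev]
    rfl
  have hB : d_salt_alt s = String.ofList
      ((oddEls s.toList.reverse).map fun c => pvTable.getD c c) := by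
    show String.ofList
        (((PySem.List.slice? ((PySem.List.slice? s.toList none none (-1)).getD [])
            (some 1) none 2).getD []).map fun c => pvTable.getD c c) = _
    rw [hrev, slice?_one_two]
    rfl
  rw [hA, hB, foldl_enumerate_odd _ [] 0 (by norm_num), List.nil_append]
  refine congrArg String.ofList (List.map_congr_left ?_)
  intro c hc
  have hmem : c ∈ s.toList := (List.mem_reverse).mp (mem_oddEls hc)
  have hd : pvDomChar c = true := by
    have := hdom
    unfold Dom_d_salt pvDomStr at this
    exact List.all_eq_true.mp this c hmem
  have hlt : c.toNat < 127 := by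
    unfold pvDomChar at hd
    simp only [Bool.or_eq_true, Bool.and_eq_true, decide_eq_true_eq, beq_iff_eq] at hd
    omega
  exact trA_eq_trB_below c hlt
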